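-- pv_equiv track=rewrite | github.com/wdwzytc/read_sed_spectra_file | read_sed_spectra_file.py | putting_a_text_into_a_list
-- ===== SOURCE A (Python) =====
-- def putting_a_text_into_a_list(text):
--     start_flag = 0
--     end_flag = 0
--     this_text = []
--     this_line = []
--     this_word = []
--     for i in range(0, len(text)):
--         if text[i] == '\t':
--             end_flag = i
--             this_word = text[start_flag: end_flag]  # not contain text[end_flag]
--             this_line.append(this_word)
--             start_flag = i + 1
--
--         if text[i] == '\n':
--             end_flag = i
--             this_word = text[start_flag: end_flag]  # not contain text[end_flag]
--             this_line.append(this_word)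
--             this_text.append(this_line)
--             this_line = []
--             start_flag = i + 1
--
--         end_flag = end_flag + 1
--
--     return this_text
-- ===== SOURCE B (Python) =====
-- def putting_a_text_into_a_list(text):
--     return [line.split('\t') for line in text.split('\n')[:-1]]
-- ===== Notes on version B (the rewrite author's own statement) =====
-- stated objective: simpler
-- what changed: Replaces the char-by-char index/flag state machine with a one-line nested split: split on newlines, drop the trailing segment after the last newline, split each line on tabs.
import Mathlib
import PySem

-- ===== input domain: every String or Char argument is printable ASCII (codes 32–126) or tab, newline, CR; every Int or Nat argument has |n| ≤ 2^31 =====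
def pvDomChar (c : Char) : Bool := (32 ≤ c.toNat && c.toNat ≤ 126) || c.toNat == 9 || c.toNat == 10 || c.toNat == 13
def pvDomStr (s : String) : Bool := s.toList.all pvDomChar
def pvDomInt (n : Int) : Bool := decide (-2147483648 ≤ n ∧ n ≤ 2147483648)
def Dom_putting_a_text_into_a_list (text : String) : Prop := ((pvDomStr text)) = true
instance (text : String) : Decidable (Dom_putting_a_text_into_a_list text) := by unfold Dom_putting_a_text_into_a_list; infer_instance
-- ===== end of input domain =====

-- B replaces A's char-by-char index/flag state machine with a nested split
-- (split on newlines, drop the trailing segment, split each line on tabs): simpler.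

-- ===== PORT A =====
-- the loop body of A's for-loop, named (state = (start_flag, end_flag, this_text, this_line))
def pvStepA (s : List Char) (st : Int × Int × List (List String) × List String) (i : Int) :
    Int × Int × List (List String) × List String :=
  let st1 :=
    if PySem.List.pyGet? s i = some '\t' then
      let endf := i
      let word := String.mk (PySem.List.slice s (some st.1) (some endf))
      (i + 1, endf, st.2.2.1, st.2.2.2 ++ [word])
    else st
  let st2 :=
    if PySem.List.pyGet? s i = some '\n' then
      let endf := i
      let word := String.mk (PySem.List.slice s (some st1.1) (some endf))
      (i + 1, endf, st1.2.2.1 ++ [st1.2.2.2 ++ [word]], ([] : List String))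
    else st1
  (st2.1, st2.2.1 + 1, st2.2.2.1, st2.2.2.2)

-- literal transliteration of A's indexed scan over range(0, len(text))
def putting_a_text_into_a_list (text : String) : List (List String) :=
  let s := text.toList
  let st := (PySem.List.pyRange 0 (PySem.Str.len text) 1).foldl (pvStepA s) (0, 0, [], [])
  st.2.2.1

-- ===== PORT B =====
-- literal transliteration of Source B: text.split('\n')[:-1], each line split on '\t'
def putting_a_text_into_a_list_alt (text : String) : List (List String) :=
  let segments := PySem.Chars.splitOn text.toList ['\n']
  (PySem.List.slice segments none (some (-1))).map
    (fun line => (PySem.Chars.splitOn line ['\t']).map String.mk)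

-- ===== PRECONDITION & SPEC =====
def Spec_putting_a_text_into_a_list (text : String) (out : List (List String)) : Prop := out = putting_a_text_into_a_list_alt text
instance (text : String) (out : List (List String)) : Decidable (Spec_putting_a_text_into_a_list text out) := by unfold Spec_putting_a_text_into_a_list; infer_instance

-- ===== CLAIM (what is proved, stated in full; the proofs are below) =====
def Claim_equal_putting_a_text_into_a_list : Prop := ∀ (text : String), Dom_putting_a_text_into_a_list text → Spec_putting_a_text_into_a_list text (putting_a_text_into_a_list text)

-- ===== LEMMAS AND PROOFS =====

-- pure recursive form of A's scan: txt = finished lines, line = finished words, buf = pending chars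
def pvScanA : List Char → List (List String) → List String → List Char → List (List String)
  | [], txt, _, _ => txt
  | c :: cs, txt, line, buf =>
    if c = '\t' then pvScanA cs txt (line ++ [String.mk buf]) []
    else if c = '\n' then pvScanA cs (txt ++ [line ++ [String.mk buf]]) [] []
    else pvScanA cs txt line (buf ++ [c])

-- single-character splitter (the spec both ports are related to)
def pvSplit1 (sep : Char) : List Char → List (List Char)
  | [] => [[]]
  | c :: cs => if c = sep then [] :: pvSplit1 sep cs
               else (pvSplit1 sep cs).modifyHead (c :: ·)

theorem pvModifyHead_id {α : Type} (l : List α) : l.modifyHead (fun x => x) = l := by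
  cases l <;> simp [List.modifyHead]

theorem pvSplit1_ne_nil (sep : Char) (l : List Char) : pvSplit1 sep l ≠ [] := by
  cases l with
  | nil => simp [pvSplit1]
  | cons c cs =>
    simp only [pvSplit1]
    split
    · simp
    · cases h : pvSplit1 sep cs with
      | nil => exact absurd h (pvSplit1_ne_nil sep cs)
      | cons a t => simp

-- PySem.Chars.splitOn with a single-char separator is pvSplit1
theorem splitOn_go_eq (sep : Char) (fuel : Nat) (l cur : List Char) (acc : List (List Char))
    (h : l.length ≤ fuel) :
    PySem.Chars.splitOn.go [sep] fuel l cur acc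
      = acc.reverse ++ (pvSplit1 sep l).modifyHead (cur.reverse ++ ·) := by
  induction fuel generalizing l cur acc with
  | zero =>
    have hl : l = [] := List.eq_nil_of_length_eq_zero (Nat.le_zero.mp h)
    subst hl
    simp [PySem.Chars.splitOn.go, pvSplit1]
  | succ f ih =>
    cases l with
    | nil => simp [PySem.Chars.splitOn.go, pvSplit1]
    | cons c rest =>
      have hr : rest.length ≤ f := by simpa using h
      by_cases hc : c = sep
      · subst hc
        have hpre : List.isPrefixOf [c] (c :: rest) = true := by
          simp [List.isPrefixOf]
        rw [show PySem.Chars.splitOn.go [c] (f + 1) (c :: rest) cur acc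
              = PySem.Chars.splitOn.go [c] f (List.drop 1 (c :: rest)) [] (cur.reverse :: acc) by
            simp [PySem.Chars.splitOn.go, hpre]]
        rw [ih _ _ _ (by simpa using hr)]
        simp [pvSplit1, pvModifyHead_id]
      · have hpre : List.isPrefixOf [sep] (c :: rest) = false := by
          simp [List.isPrefixOf]
          exact fun hx => hc hx.symm
        rw [show PySem.Chars.splitOn.go [sep] (f + 1) (c :: rest) cur acc
              = PySem.Chars.splitOn.go [sep] f rest (c :: cur) acc by
            simp [PySem.Chars.splitOn.go, hpre]]
        rw [ih _ _ _ hr]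
        simp only [pvSplit1, if_neg hc]
        obtain ⟨a, t, ht⟩ : ∃ a t, pvSplit1 sep rest = a :: t := by
          cases hx : pvSplit1 sep rest with
          | nil => exact absurd hx (pvSplit1_ne_nil sep rest)
          | cons a t => exact ⟨a, t, rfl⟩
        simp [ht, List.modifyHead]

theorem splitOn_eq_pvSplit1 (sep : Char) (l : List Char) :
    PySem.Chars.splitOn l [sep] = pvSplit1 sep l := by
  have := splitOn_go_eq sep (l.length + 1) l [] [] (by omega)
  simpa [PySem.Chars.splitOn, pvModifyHead_id] using this

-- A's foldl over pyRange equals pvScanA (loop invariant: end_flag = i, buf = s[start:i])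
theorem foldA_eq_scan (s : List Char) (j start : Nat) (hj : j ≤ s.length) (hs : start ≤ j)
    (txt : List (List String)) (line : List String) :
    ((PySem.List.pyRange (j : Int) (s.length : Int) 1).foldl (pvStepA s)
        ((start : Int), (j : Int), txt, line)).2.2.1
      = pvScanA (s.drop j) txt line ((s.drop start).take (j - start)) := by
  by_cases hlt : j < s.length
  · obtain ⟨c, hc⟩ : ∃ c, s[j]? = some c := ⟨s[j], List.getElem?_eq_getElem hlt⟩
    have hdrop : s.drop j = c :: s.drop (j + 1) := by
      rw [List.drop_eq_getElem_cons hlt]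
      simp_all
    rw [PySem.List.pyRange_one_cons (by exact_mod_cast hlt)]
    simp only [List.foldl_cons]
    have hget : PySem.List.pyGet? s (j : Int) = some c := by
      rw [PySem.List.pyGet?_natCast]; exact hc
    have hslice : PySem.List.slice s (some (start : Int)) (some (j : Int))
        = (s.drop start).take (j - start) := PySem.List.slice_natCast s start j
    by_cases ht : c = '\t'
    · subst ht
      have hstep : pvStepA s ((start : Int), (j : Int), txt, line) (j : Int)
          = ((j : Int) + 1, (j : Int) + 1, txt,
             line ++ [String.mk ((s.drop start).take (j - start))]) := by
        simp [pvStepA, hget, hslice]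
      rw [hstep, show ((j : Int) + 1) = (((j + 1 : Nat)) : Int) by push_cast; ring,
          foldA_eq_scan s (j + 1) (j + 1) hlt (le_refl _) txt _]
      rw [hdrop]
      simp [pvScanA]
    · by_cases hn : c = '\n'
      · subst hn
        have hstep : pvStepA s ((start : Int), (j : Int), txt, line) (j : Int)
            = ((j : Int) + 1, (j : Int) + 1,
               txt ++ [line ++ [String.mk ((s.drop start).take (j - start))]], []) := by
          simp [pvStepA, hget, hslice]
        rw [hstep, show ((j : Int) + 1) = (((j + 1 : Nat)) : Int) by push_cast; ring,
            foldA_eq_scan s (j + 1) (j + 1) hlt (le_refl _) _ _]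
        rw [hdrop]
        simp [pvScanA, ht]
      · have hstep : pvStepA s ((start : Int), (j : Int), txt, line) (j : Int)
            = ((start : Int), (j : Int) + 1, txt, line) := by
          simp [pvStepA, hget, ht, hn]
        rw [hstep, show ((j : Int) + 1) = (((j + 1 : Nat)) : Int) by push_cast; ring,
            foldA_eq_scan s (j + 1) start hlt (by omega) txt line]
        rw [hdrop]
        have hbuf : (s.drop start).take (j + 1 - start)
            = (s.drop start).take (j - start) ++ [c] := by
          rw [show j + 1 - start = (j - start) + 1 by omega, List.take_succ]
          have : (s.drop start)[j - start]? = some c := by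
            rw [List.getElem?_drop, show start + (j - start) = j by omega]; exact hc
          simp [this]
        rw [hbuf]
        simp [pvScanA, ht, hn]
  · have hj' : j = s.length := by omega
    subst hj'
    rw [show PySem.List.pyRange (s.length : Int) (s.length : Int) 1 = [] by
      simp [PySem.List.pyRange]]
    simp [pvScanA]
termination_by s.length - j

-- threading the finished-lines accumulator out of pvScanA
def pvF : List String → List Char → List Char → List (List String)
  | _, _, [] => []
  | line, buf, c :: cs =>
    if c = '\t' then pvF (line ++ [String.mk buf]) [] cs
    else if c = '\n' then (line ++ [String.mk buf]) :: pvF [] [] cs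
    else pvF line (buf ++ [c]) cs

theorem scanA_eq_pvF (cs : List Char) (txt : List (List String)) (line : List String)
    (buf : List Char) : pvScanA cs txt line buf = txt ++ pvF line buf cs := by
  induction cs generalizing txt line buf with
  | nil => simp [pvScanA, pvF]
  | cons c cs ih =>
    simp only [pvScanA, pvF]
    split
    · rw [ih]
    · split
      · rw [ih]; simp
      · rw [ih]

def pvTabMap (l : List Char) : List String := (pvSplit1 '\t' l).map String.mk

-- pvF against the nested split, generalizing the carried line and buffer
theorem pvF_eq_split (cs : List Char) (line : List String) (buf : List Char) :
    pvF line buf cs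
      = match (pvSplit1 '\n' cs).dropLast with
        | [] => []
        | l0 :: ls =>
          (line ++ ((pvSplit1 '\t' l0).modifyHead (buf ++ ·)).map String.mk)
            :: ls.map pvTabMap := by
  induction cs generalizing line buf with
  | nil => simp [pvF, pvSplit1]
  | cons c cs ih =>
    obtain ⟨a, t, ht⟩ : ∃ a t, pvSplit1 '\n' cs = a :: t := by
      cases hx : pvSplit1 '\n' cs with
      | nil => exact absurd hx (pvSplit1_ne_nil '\n' cs)
      | cons a t => exact ⟨a, t, rfl⟩
    by_cases hn : c = '\n'
    · subst hn
      have h1 : pvSplit1 '\n' ('\n' :: cs) = [] :: a :: t := by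
        simp [pvSplit1, ht]
      rw [pvF, if_neg (by decide), if_pos rfl, ih, h1, List.dropLast_cons₂, ht]
      obtain ⟨w, ws, hw⟩ : ∃ w ws, pvSplit1 '\t' a = w :: ws := by
        cases hx : pvSplit1 '\t' a with
        | nil => exact absurd hx (pvSplit1_ne_nil '\t' a)
        | cons w ws => exact ⟨w, ws, rfl⟩
      cases t with
      | nil => simp [pvSplit1, List.modifyHead]
      | cons b tb =>
        rw [List.dropLast_cons₂]
        simp [pvSplit1, List.modifyHead, hw, pvTabMap]
    · have h1 : pvSplit1 '\n' (c :: cs) = (c :: a) :: t := by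
        simp [pvSplit1, hn, ht, List.modifyHead]
      rw [h1]
      obtain ⟨w, ws, hw⟩ : ∃ w ws, pvSplit1 '\t' a = w :: ws := by
        cases hx : pvSplit1 '\t' a with
        | nil => exact absurd hx (pvSplit1_ne_nil '\t' a)
        | cons w ws => exact ⟨w, ws, rfl⟩
      by_cases htb : c = '\t'
      · subst htb
        rw [pvF, if_pos rfl, ih, ht]
        cases t with
        | nil => simp
        | cons b tb =>
          rw [List.dropLast_cons₂, List.dropLast_cons₂]
          simp [pvSplit1, hw, List.modifyHead]
      · rw [pvF, if_neg htb, if_neg hn, ih, ht]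
        cases t with
        | nil => simp
        | cons b tb =>
          rw [List.dropLast_cons₂, List.dropLast_cons₂]
          simp [pvSplit1, htb, hw, List.modifyHead]

theorem pvF_nil_nil (cs : List Char) :
    pvF [] [] cs = (pvSplit1 '\n' cs).dropLast.map pvTabMap := by
  rw [pvF_eq_split]
  cases hdl : (pvSplit1 '\n' cs).dropLast with
  | nil => simp
  | cons l0 ls =>
    obtain ⟨a, t, ht⟩ : ∃ a t, pvSplit1 '\t' l0 = a :: t := by
      cases hx : pvSplit1 '\t' l0 with
      | nil => exact absurd hx (pvSplit1_ne_nil '\t' l0)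
      | cons a t => exact ⟨a, t, rfl⟩
    simp [pvTabMap, ht, List.modifyHead]

-- ===== VERDICT (by name: the statement is the Claim_ definition above) =====
theorem putting_a_text_into_a_list_spec : Claim_equal_putting_a_text_into_a_list := by
  intro text _
  unfold Spec_putting_a_text_into_a_list putting_a_text_into_a_list putting_a_text_into_a_list_alt
  have hA := foldA_eq_scan text.toList 0 0 (Nat.zero_le _) (le_refl 0) [] []
  simp only [Nat.cast_zero, List.drop_zero, Nat.sub_zero, List.take_zero] at hA
  rw [PySem.Str.len_eq]
  simp only []
  rw [hA, scanA_eq_pvF, pvF_nil_nil, List.nil_append]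
  rw [PySem.List.slice_to_neg_one, splitOn_eq_pvSplit1]
  apply List.map_congr_left
  intro l _
  rw [splitOn_eq_pvSplit1]
  rfl
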